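-- pv_equiv track=rewrite | github.com/colemanjenkins/lorawan-temperature-compression | lorawan-device/decompress_combined.py | read_int
-- ===== SOURCE A (Python) =====
-- def read_int(buf, bit, length):
--     total_bits_remaining = length
--     val = 0
--     bit_start = bit
--
--     while total_bits_remaining > 0:
--         byte = bit_start // 8
--         control_bits = buf[byte]
--         local_bit_start = bit_start % 8
--         bit_rem_in_byte = 8 - local_bit_start
--         n_bits_filling = 0
--
--         if local_bit_start != 0:
--             n_bits_filling = min(bit_rem_in_byte, total_bits_remaining)
--             keep_bits = 0
--             for i in range(local_bit_start, min(local_bit_start + n_bits_filling, 8)): # removed + 1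
--                 keep_bits |= (0x1 << (7-i))
--             control_bits &= keep_bits
--             if total_bits_remaining < bit_rem_in_byte:
--                 control_bits >>= bit_rem_in_byte - total_bits_remaining
--             else:
--                 shift = total_bits_remaining - n_bits_filling
--                 control_bits <<= shift
--
--         else: # bit_start % 8 == 0
--             n_bits_filling = min(8, total_bits_remaining)
--             if total_bits_remaining > n_bits_filling:
--                 control_bits <<= total_bits_remaining - n_bits_filling
--             else:
--                 control_bits >>= bit_rem_in_byte - n_bits_filling
--
--         val |= control_bits
--         total_bits_remaining -= n_bits_filling
--         bit_start += n_bits_filling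
--
--
--     return val
-- ===== SOURCE B (Python) =====
-- def read_int(buf, bit, length):
--     val = 0
--     for i in range(bit, bit + length):
--         val = (val << 1) | ((buf[i // 8] >> (7 - i % 8)) & 1)
--     return val
-- ===== Notes on version B (the rewrite author's own statement) =====
-- stated objective: simpler
-- what changed: Replaces A's per-byte chunking loop (with its inner mask-building loop and the aligned/unaligned/partial-byte case analysis) by a single per-bit loop that extracts one bit per step and accumulates val = (val << 1) | bit.
-- outside the precondition, e.g. on read_int([256], 0, 8): A returns 256, B returns 0; on read_int([0, 300], 5, 6): A returns 9, B returns 1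
import Mathlib
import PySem

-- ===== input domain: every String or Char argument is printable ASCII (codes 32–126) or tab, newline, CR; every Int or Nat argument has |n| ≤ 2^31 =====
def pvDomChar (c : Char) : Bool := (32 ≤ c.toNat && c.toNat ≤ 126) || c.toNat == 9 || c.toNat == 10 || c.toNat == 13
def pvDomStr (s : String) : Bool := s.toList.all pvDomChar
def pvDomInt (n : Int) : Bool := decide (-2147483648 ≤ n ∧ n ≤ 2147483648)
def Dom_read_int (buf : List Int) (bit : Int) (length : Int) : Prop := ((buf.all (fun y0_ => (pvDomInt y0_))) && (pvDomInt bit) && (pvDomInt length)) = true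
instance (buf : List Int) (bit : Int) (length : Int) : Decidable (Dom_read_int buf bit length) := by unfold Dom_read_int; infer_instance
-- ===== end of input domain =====

-- B replaces A's per-byte chunking (inner mask-building loop + alignment case analysis) by one
-- per-bit shift-accumulate loop; same cost, simpler code.


-- ===== PORT A =====
-- the 'while total_bits_remaining > 0' loop of A (state: rem = total_bits_remaining, val, bit_start)
def readIntLoop (buf : List Int) (rem : Int) (val : Int) (bit_start : Int) : Int :=
  if _h : 0 < rem then
    let byte := PySem.Int.floordiv bit_start 8
    let control_bits := (PySem.List.pyGet? buf byte).getD 0   -- buf[byte]; IndexError excluded by Pre_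
    let local_bit_start := PySem.Int.mod bit_start 8
    let bit_rem_in_byte := 8 - local_bit_start
    if local_bit_start ≠ 0 then
      let n_bits_filling := min bit_rem_in_byte rem
      let keep_bits := (PySem.List.pyRange local_bit_start (min (local_bit_start + n_bits_filling) 8) 1).foldl
        (fun k i => PySem.Int.bor k ((1 : Int) <<< (7 - i).toNat)) 0
      let cb := PySem.Int.band control_bits keep_bits
      let cb := if rem < bit_rem_in_byte then cb >>> (bit_rem_in_byte - rem).toNat
                else cb <<< (rem - n_bits_filling).toNat
      readIntLoop buf (rem - n_bits_filling) (PySem.Int.bor val cb) (bit_start + n_bits_filling)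
    else
      let n_bits_filling := min 8 rem
      let cb := if n_bits_filling < rem then control_bits <<< (rem - n_bits_filling).toNat
                else control_bits >>> (bit_rem_in_byte - n_bits_filling).toNat
      readIntLoop buf (rem - n_bits_filling) (PySem.Int.bor val cb) (bit_start + n_bits_filling)
  else val
termination_by rem.toNat
decreasing_by
  · have h1 : 0 ≤ PySem.Int.mod bit_start 8 := PySem.Int.mod_nonneg bit_start (by norm_num)
    have h2 : PySem.Int.mod bit_start 8 < 8 := PySem.Int.mod_lt bit_start (by norm_num)
    omega
  · omega

def read_int (buf : List Int) (bit : Int) (length : Int) : Int :=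
  readIntLoop buf length 0 bit

-- ===== PORT B =====
def read_int_alt (buf : List Int) (bit : Int) (length : Int) : Int :=
  (PySem.List.pyRange bit (bit + length) 1).foldl
    (fun val i =>
      PySem.Int.bor (val <<< (1 : Nat))
        (PySem.Int.band (((PySem.List.pyGet? buf (PySem.Int.floordiv i 8)).getD 0) >>> (7 - PySem.Int.mod i 8).toNat) 1))
    0

-- ===== PRECONDITION & SPEC =====
-- Pre_ excludes (a) bit windows reaching outside buf (Python A raises IndexError there), and
-- (b) inputs where a buffer entry READ by the window lies outside 0..255: such a "byte" is outside
-- the function's byte-buffer domain, and the value A then returns (it ORs whole entries, including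
-- high and sign bits, into the result on its byte-aligned path) is an artifact of A's masking strategy.
def Pre_read_int (buf : List Int) (bit : Int) (length : Int) : Prop :=
  length ≤ 0 ∨
    (-8 * (buf.length : Int) ≤ bit ∧ bit + length ≤ 8 * (buf.length : Int) ∧
     ∀ j ∈ PySem.List.pyRange (PySem.Int.floordiv bit 8) (PySem.Int.floordiv (bit + length - 1) 8 + 1) 1,
       0 ≤ (PySem.List.pyGet? buf j).getD 0 ∧ (PySem.List.pyGet? buf j).getD 0 < 256)
instance (buf : List Int) (bit : Int) (length : Int) : Decidable (Pre_read_int buf bit length) := by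
  unfold Pre_read_int; infer_instance

def pvWitness_read_int : List Int × Int × Int := ([170, 85], 3, 9)

def Spec_read_int (buf : List Int) (bit : Int) (length : Int) (out : Int) : Prop := out = read_int_alt buf bit length
instance (buf : List Int) (bit : Int) (length : Int) (out : Int) : Decidable (Spec_read_int buf bit length out) := by unfold Spec_read_int; infer_instance

-- ===== CLAIM (what is proved, stated in full; the proofs are below) =====
def Claim_equal_read_int : Prop := ∀ (buf : List Int) (bit : Int) (length : Int), Dom_read_int buf bit length → Pre_read_int buf bit length → Spec_read_int buf bit length (read_int buf bit length)

-- ===== LEMMAS AND PROOFS =====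

-- B's loop body, and its arithmetic reformulation (2*v + bit)
def bitStep (buf : List Int) (v i : Int) : Int :=
  PySem.Int.bor (v <<< (1 : Nat))
    (PySem.Int.band (((PySem.List.pyGet? buf (PySem.Int.floordiv i 8)).getD 0) >>> (7 - PySem.Int.mod i 8).toNat) 1)

def aStep (buf : List Int) (v i : Int) : Int :=
  2 * v + PySem.Int.mod (((PySem.List.pyGet? buf (PySem.Int.floordiv i 8)).getD 0) >>> (7 - PySem.Int.mod i 8).toNat) 2

-- the bits of one byte b at positions p ∈ [l, l+n), accumulated MSB-first
def byteStep (b : Int) (v p : Int) : Int := 2 * v + PySem.Int.mod (b >>> (7 - p).toNat) 2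

def chunkFold (b l n : Int) : Int :=
  (PySem.List.pyRange l (l + n) 1).foldl (byteStep b) 0

-- A's keep_bits mask
def keepOf (l n : Int) : Int :=
  (PySem.List.pyRange l (min (l + n) 8) 1).foldl (fun k i => PySem.Int.bor k ((1 : Int) <<< (7 - i).toNat)) 0


lemma bitStep_eq_aStep (buf : List Int) (v i : Int) (hv : 0 ≤ v) :
    bitStep buf v i = aStep buf v i := by
  unfold bitStep aStep
  rw [PySem.Int.band_one]
  set r := PySem.Int.mod (((PySem.List.pyGet? buf (PySem.Int.floordiv i 8)).getD 0) >>> (7 - PySem.Int.mod i 8).toNat) 2 with hr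
  have h0 : 0 ≤ r := PySem.Int.mod_nonneg _ (by norm_num)
  have h2 : r < 2 := PySem.Int.mod_lt _ (by norm_num)
  rw [Int.shiftLeft_eq]
  have hcase : r = 0 ∨ r = 1 := by omega
  obtain ⟨m, rfl⟩ := Int.eq_ofNat_of_zero_le hv
  rcases hcase with h | h
  · rw [h, PySem.Int.bor_zero]; ring
  · rw [h]
    have e1 : ((m : Int) * 2 ^ 1) = ((m * 2 : ℕ) : Int) := by push_cast; ring
    have e2 : (1 : Int) = ((1 : ℕ) : Int) := by norm_num
    rw [e1, e2, PySem.Int.bor_natCast]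
    have : m * 2 ||| 1 = m * 2 + 1 := by
      have := Nat.two_pow_add_eq_or_of_lt (i := 1) (b := 1) (by norm_num) m
      simpa [Nat.mul_comm] using this.symm
    rw [this]; push_cast; ring

lemma aStep_nonneg (buf : List Int) (v i : Int) (hv : 0 ≤ v) : 0 ≤ aStep buf v i := by
  unfold aStep
  have h0 : 0 ≤ PySem.Int.mod (((PySem.List.pyGet? buf (PySem.Int.floordiv i 8)).getD 0) >>> (7 - PySem.Int.mod i 8).toNat) 2 :=
    PySem.Int.mod_nonneg _ (by norm_num)
  omega

lemma foldl_bitStep_eq_aStep (buf : List Int) (L : List Int) :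
    ∀ X : Int, 0 ≤ X → L.foldl (bitStep buf) X = L.foldl (aStep buf) X := by
  induction L with
  | nil => intro X _; rfl
  | cons a L ih =>
    intro X hX
    rw [List.foldl_cons, List.foldl_cons, bitStep_eq_aStep buf X a hX]
    exact ih _ (aStep_nonneg buf X a hX)

lemma foldl_aStep_affine (buf : List Int) (L : List Int) :
    ∀ X : Int, L.foldl (aStep buf) X = X * 2 ^ L.length + L.foldl (aStep buf) 0 := by
  induction L with
  | nil => intro X; simp
  | cons a L ih =>
    intro X
    rw [List.foldl_cons, List.foldl_cons, ih (aStep buf X a), ih (aStep buf 0 a)]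
    show (2 * X + _) * 2 ^ L.length + _ = X * 2 ^ (L.length + 1) + ((2 * 0 + _) * 2 ^ L.length + _)
    ring

-- per-chunk facts about a single byte, fully bounded: checked by `decide`
set_option maxRecDepth 100000 in
lemma chunk_bounds : ∀ (b : Fin 256) (n : Fin 9) (l : Fin 9), l.val + n.val ≤ 8 →
    0 ≤ chunkFold (b.val : Int) (l.val : Int) (n.val : Int) ∧
    chunkFold (b.val : Int) (l.val : Int) (n.val : Int) < 2 ^ n.val := by
  decide

set_option maxRecDepth 100000 in
lemma chunk_unaligned : ∀ (b : Fin 256) (n : Fin 9) (l : Fin 9), 0 < l.val → 0 < n.val → l.val + n.val ≤ 8 →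
    (PySem.Int.band (b.val : Int) (keepOf (l.val : Int) (n.val : Int))) >>> (8 - l.val - n.val)
      = chunkFold (b.val : Int) (l.val : Int) (n.val : Int) := by
  decide

set_option maxRecDepth 100000 in
lemma chunk_aligned : ∀ (b : Fin 256) (n : Fin 9), 0 < n.val → n.val ≤ 8 →
    (b.val : Int) >>> (8 - n.val) = chunkFold (b.val : Int) 0 (n.val : Int) := by
  decide

-- Int-level wrappers around the decided chunk facts
lemma chunk_bounds' (b l n : Int) (hb0 : 0 ≤ b) (hb2 : b < 256) (hl : 0 ≤ l) (hn : 0 ≤ n)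
    (hln : l + n ≤ 8) : 0 ≤ chunkFold b l n ∧ chunkFold b l n < 2 ^ n.toNat := by
  have h := chunk_bounds ⟨b.toNat, by omega⟩ ⟨n.toNat, by omega⟩ ⟨l.toNat, by omega⟩ (by simp; omega)
  simpa [Int.toNat_of_nonneg hb0, Int.toNat_of_nonneg hl, Int.toNat_of_nonneg hn] using h

lemma chunk_unaligned' (b l n : Int) (hb0 : 0 ≤ b) (hb2 : b < 256) (hl : 0 < l) (hl8 : l < 8)
    (hn : 0 < n) (hln : l + n ≤ 8) :
    (PySem.Int.band b (keepOf l n)) >>> (8 - l - n).toNat = chunkFold b l n := by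
  have h := chunk_unaligned ⟨b.toNat, by omega⟩ ⟨n.toNat, by omega⟩ ⟨l.toNat, by omega⟩
    (by simp; omega) (by simp; omega) (by simp; omega)
  have e : (8 - l - n).toNat = 8 - l.toNat - n.toNat := by omega
  rw [e]
  simpa [Int.toNat_of_nonneg hb0, Int.toNat_of_nonneg (le_of_lt hl), Int.toNat_of_nonneg (le_of_lt hn)] using h

lemma chunk_aligned' (b n : Int) (hb0 : 0 ≤ b) (hb2 : b < 256) (hn : 0 < n) (hn8 : n ≤ 8) :
    b >>> (8 - n).toNat = chunkFold b 0 n := by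
  have h := chunk_aligned ⟨b.toNat, by omega⟩ ⟨n.toNat, by omega⟩ (by simp; omega) (by simp; omega)
  have e : (8 - n).toNat = 8 - n.toNat := by omega
  rw [e]
  simpa [Int.toNat_of_nonneg hb0, Int.toNat_of_nonneg (le_of_lt hn)] using h

-- A's control_bits after masking and shifting, as a function of the byte, alignment and sizes
def cbOf (b l n rem : Int) : Int :=
  if l ≠ 0 then
    if rem < 8 - l then (PySem.Int.band b (keepOf l n)) >>> (8 - l - rem).toNat
    else (PySem.Int.band b (keepOf l n)) <<< (rem - n).toNat
  else
    if min 8 rem < rem then b <<< (rem - min 8 rem).toNat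
    else b >>> (8 - min 8 rem).toNat

lemma loop_nil (buf : List Int) (rem val s : Int) (h : rem ≤ 0) :
    readIntLoop buf rem val s = val := by
  rw [readIntLoop, dif_neg (by omega)]

lemma loop_step (buf : List Int) (rem s val b : Int) (hrem : 0 < rem)
    (hOpt : PySem.List.pyGet? buf (PySem.Int.floordiv s 8) = some b) :
    readIntLoop buf rem val s
      = readIntLoop buf (rem - min (8 - PySem.Int.mod s 8) rem)
          (PySem.Int.bor val (cbOf b (PySem.Int.mod s 8) (min (8 - PySem.Int.mod s 8) rem) rem))
          (s + min (8 - PySem.Int.mod s 8) rem) := by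
  rw [readIntLoop, dif_pos hrem]
  by_cases hl : PySem.Int.mod s 8 ≠ 0
  · simp only [hOpt, Option.getD_some, if_pos hl, cbOf]
    rfl
  · have hl0 : PySem.Int.mod s 8 = 0 := by omega
    simp only [hOpt, Option.getD_some, cbOf, hl0, sub_zero]
    norm_num

lemma cbOf_eq (b l n rem : Int) (hb0 : 0 ≤ b) (hb2 : b < 256) (hl0 : 0 ≤ l) (hl8 : l < 8)
    (hrem : 0 < rem) (hn : n = min (8 - l) rem) :
    cbOf b l n rem = chunkFold b l n * 2 ^ (rem - n).toNat := by
  have hn1 : 1 ≤ n := by omega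
  have hn8 : n ≤ 8 - l := by omega
  unfold cbOf
  by_cases hl : l ≠ 0
  · have hlpos : 0 < l := by omega
    have hkey := chunk_unaligned' b l n hb0 hb2 hlpos hl8 (by omega) (by omega)
    by_cases hc : rem < 8 - l
    · have hne : n = rem := by omega
      have hz : (rem - n).toNat = 0 := by omega
      rw [if_pos hl, if_pos hc, hz, pow_zero, mul_one, ← hne, ← hkey]
    · have hne : n = 8 - l := by omega
      have hz : (8 - l - n).toNat = 0 := by omega
      rw [hz, Int.shiftRight_zero] at hkey
      rw [if_pos hl, if_neg hc, hkey, Int.shiftLeft_eq]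
  · have hl0' : l = 0 := by omega
    subst hl0'
    have hmin : min 8 rem = n := by omega
    have hkey := chunk_aligned' b n hb0 hb2 (by omega) (by omega)
    rw [if_neg hl, hmin]
    by_cases hc : n < rem
    · have hne : n = 8 := by omega
      have hz : (8 - n).toNat = 0 := by omega
      rw [hz, Int.shiftRight_zero] at hkey
      rw [if_pos hc, Int.shiftLeft_eq, ← hkey]
    · have hz : (rem - n).toNat = 0 := by omega
      rw [if_neg hc, hz, pow_zero, mul_one, hkey]

lemma bor_shift_add (X C : Int) (nn k : Nat) (hX : 0 ≤ X) (hC : 0 ≤ C) (hCn : C < 2 ^ nn) :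
    PySem.Int.bor (X * 2 ^ (nn + k)) (C * 2 ^ k) = (X * 2 ^ nn + C) * 2 ^ k := by
  obtain ⟨x, rfl⟩ := Int.eq_ofNat_of_zero_le hX
  obtain ⟨c, rfl⟩ := Int.eq_ofNat_of_zero_le hC
  have hc : c < 2 ^ nn := by exact_mod_cast hCn
  have e1 : ((x : Int) * 2 ^ (nn + k)) = ((x * 2 ^ (nn + k) : ℕ) : Int) := by push_cast; ring
  have e2 : ((c : Int) * 2 ^ k) = ((c * 2 ^ k : ℕ) : Int) := by push_cast; ring
  rw [e1, e2, PySem.Int.bor_natCast]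
  have hnat : x * 2 ^ (nn + k) ||| c * 2 ^ k = (x * 2 ^ nn + c) * 2 ^ k := by
    have hor : 2 ^ nn * x ||| c = 2 ^ nn * x + c := (Nat.two_pow_add_eq_or_of_lt hc x).symm
    calc x * 2 ^ (nn + k) ||| c * 2 ^ k
        = (2 ^ nn * x) <<< k ||| c <<< k := by
          rw [Nat.shiftLeft_eq, Nat.shiftLeft_eq, pow_add]; ring_nf
      _ = ((2 ^ nn * x) ||| c) <<< k := (Nat.shiftLeft_or_distrib).symm
      _ = (2 ^ nn * x + c) <<< k := by rw [hor]
      _ = (x * 2 ^ nn + c) * 2 ^ k := by rw [Nat.shiftLeft_eq, Nat.mul_comm (2 ^ nn) x]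
  rw [hnat]; push_cast; ring

lemma chunk_shift (buf : List Int) (b s n : Int) (hn0 : 0 ≤ n)
    (hOpt : PySem.List.pyGet? buf (PySem.Int.floordiv s 8) = some b)
    (hln : PySem.Int.mod s 8 + n ≤ 8) :
    (PySem.List.pyRange s (s + n) 1).foldl (aStep buf) 0 = chunkFold b (PySem.Int.mod s 8) n := by
  have hl0 : 0 ≤ PySem.Int.mod s 8 := PySem.Int.mod_nonneg s (by norm_num)
  have hl8 : PySem.Int.mod s 8 < 8 := PySem.Int.mod_lt s (by norm_num)
  have hdm := PySem.Int.floordiv_mul_add_mod s 8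
  unfold chunkFold
  rw [PySem.List.pyRange_one s (s + n), PySem.List.pyRange_one (PySem.Int.mod s 8) (PySem.Int.mod s 8 + n)]
  rw [add_sub_cancel_left, add_sub_cancel_left]
  rw [List.foldl_map, List.foldl_map]
  apply PySem.List.foldl_congr_mem
  intro acc k hk
  have hkn : (k : Int) < n := by
    have := List.mem_range.mp hk
    omega
  have hq : PySem.Int.floordiv (s + (k : Int)) 8 = PySem.Int.floordiv s 8 := by
    rw [PySem.Int.floordiv_eq_iff_of_pos (by norm_num)]
    constructor <;> omega
  have hdm2 := PySem.Int.floordiv_mul_add_mod (s + (k : Int)) 8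
  rw [hq] at hdm2
  have hm : PySem.Int.mod (s + (k : Int)) 8 = PySem.Int.mod s 8 + (k : Int) := by omega
  unfold aStep byteStep
  rw [hq, hm, hOpt]
  rfl

lemma loop_eq (buf : List Int) :
    ∀ (fuel : Nat) (rem s X : Int), rem ≤ (fuel : Int) → 0 ≤ X →
    -8 * (buf.length : Int) ≤ s → s + rem ≤ 8 * (buf.length : Int) →
    (∀ j : Int, PySem.Int.floordiv s 8 ≤ j → j ≤ PySem.Int.floordiv (s + rem - 1) 8 →
       0 ≤ (PySem.List.pyGet? buf j).getD 0 ∧ (PySem.List.pyGet? buf j).getD 0 < 256) →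
    readIntLoop buf rem (X * 2 ^ rem.toNat) s
      = (PySem.List.pyRange s (s + rem) 1).foldl (aStep buf) X := by
  intro fuel
  induction fuel with
  | zero =>
    intro rem s X h0 hX hs1 hs2 hb
    have hr : rem ≤ 0 := by exact_mod_cast h0
    rw [loop_nil buf rem _ s hr, PySem.List.pyRange_one_eq_nil (by omega)]
    have : rem.toNat = 0 := by omega
    rw [this, pow_zero, mul_one, List.foldl_nil]
  | succ f ih =>
    intro rem s X hfuel hX hs1 hs2 hb
    by_cases hrem : 0 < rem
    · -- the accessed byte
      have hdm := PySem.Int.floordiv_mul_add_mod s 8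
      have hl0 : 0 ≤ PySem.Int.mod s 8 := PySem.Int.mod_nonneg s (by norm_num)
      have hl8 : PySem.Int.mod s 8 < 8 := PySem.Int.mod_lt s (by norm_num)
      have hqrange : -(buf.length : Int) ≤ PySem.Int.floordiv s 8 ∧
          PySem.Int.floordiv s 8 < (buf.length : Int) := by omega
      -- s's byte index lies in the read window
      have hdmE := PySem.Int.floordiv_mul_add_mod (s + rem - 1) 8
      have hlE0 : 0 ≤ PySem.Int.mod (s + rem - 1) 8 := PySem.Int.mod_nonneg _ (by norm_num)
      have hlE8 : PySem.Int.mod (s + rem - 1) 8 < 8 := PySem.Int.mod_lt _ (by norm_num)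
      have hbq := hb (PySem.Int.floordiv s 8) le_rfl (by omega)
      obtain ⟨b, hOpt⟩ : ∃ b, PySem.List.pyGet? buf (PySem.Int.floordiv s 8) = some b := by
        cases hO : PySem.List.pyGet? buf (PySem.Int.floordiv s 8) with
        | none =>
          exfalso
          have := (PySem.List.pyGet?_eq_none_iff buf (PySem.Int.floordiv s 8)).mp hO
          exact this (by unfold PySem.Raise.InRange; omega)
        | some b => exact ⟨b, rfl⟩
      rw [hOpt, Option.getD_some] at hbq
      obtain ⟨hb0, hb2⟩ := hbq
      set l := PySem.Int.mod s 8 with hldef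
      set n := min (8 - l) rem with hndef
      have hn1 : 1 ≤ n := by omega
      have hln : l + n ≤ 8 := by omega
      -- one iteration of A's loop
      rw [loop_step buf rem s _ b hrem hOpt, ← hldef, ← hndef]
      rw [cbOf_eq b l n rem hb0 hb2 hl0 hl8 hrem hndef]
      obtain ⟨hC0, hC2⟩ := chunk_bounds' b l n hb0 hb2 hl0 (by omega) hln
      have hsplitN : rem.toNat = n.toNat + (rem - n).toNat := by omega
      rw [hsplitN, bor_shift_add X (chunkFold b l n) n.toNat (rem - n).toNat hX hC0 hC2]
      -- the recursive call via the induction hypothesis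
      have hb' : ∀ j : Int, PySem.Int.floordiv (s + n) 8 ≤ j →
          j ≤ PySem.Int.floordiv (s + n + (rem - n) - 1) 8 →
          0 ≤ (PySem.List.pyGet? buf j).getD 0 ∧ (PySem.List.pyGet? buf j).getD 0 < 256 := by
        intro j hj1 hj2
        rw [show s + n + (rem - n) - 1 = s + rem - 1 from by ring] at hj2
        have hdm' := PySem.Int.floordiv_mul_add_mod (s + n) 8
        have hm'0 : 0 ≤ PySem.Int.mod (s + n) 8 := PySem.Int.mod_nonneg _ (by norm_num)
        have hm'8 : PySem.Int.mod (s + n) 8 < 8 := PySem.Int.mod_lt _ (by norm_num)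
        exact hb j (by omega) hj2
      have hrec := ih (rem - n) (s + n) (X * 2 ^ n.toNat + chunkFold b l n)
        (by push_cast at hfuel ⊢; omega)
        (add_nonneg (mul_nonneg hX (by positivity)) hC0)
        (by omega) (by omega) hb'
      rw [hrec]
      -- split B's range at the chunk boundary
      rw [PySem.List.pyRange_one_append s (s + n) (s + rem) (by omega) (by omega), List.foldl_append]
      rw [foldl_aStep_affine buf _ X, PySem.List.length_pyRange_one, add_sub_cancel_left]
      rw [chunk_shift buf b s n (by omega) hOpt (by omega)]
      have : s + n + (rem - n) = s + rem := by ring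
      rw [this]
    · have hr : rem ≤ 0 := by omega
      rw [loop_nil buf rem _ s hr, PySem.List.pyRange_one_eq_nil (by omega)]
      have : rem.toNat = 0 := by omega
      rw [this, pow_zero, mul_one, List.foldl_nil]

-- ===== VERDICT (by name: the statement is the Claim_ definition above) =====
theorem read_int_spec : Claim_equal_read_int := by
  unfold Claim_equal_read_int
  intro buf bit length _hdom hpre
  unfold Spec_read_int read_int read_int_alt
  have hB : (PySem.List.pyRange bit (bit + length) 1).foldl (bitStep buf) 0
      = (PySem.List.pyRange bit (bit + length) 1).foldl (aStep buf) 0 :=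
    foldl_bitStep_eq_aStep buf _ 0 le_rfl
  show readIntLoop buf length 0 bit = (PySem.List.pyRange bit (bit + length) 1).foldl (bitStep buf) 0
  rw [hB]
  rcases hpre with hlen | ⟨h1, h2, hwin⟩
  · rw [loop_nil buf length 0 bit hlen, PySem.List.pyRange_one_eq_nil (by omega), List.foldl_nil]
  · have hb : ∀ j : Int, PySem.Int.floordiv bit 8 ≤ j →
        j ≤ PySem.Int.floordiv (bit + length - 1) 8 →
        0 ≤ (PySem.List.pyGet? buf j).getD 0 ∧ (PySem.List.pyGet? buf j).getD 0 < 256 := by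
      intro j hj1 hj2
      exact hwin j ((PySem.List.mem_pyRange_one).mpr ⟨hj1, by omega⟩)
    have := loop_eq buf length.toNat length bit 0 (by omega) le_rfl h1 h2 hb
    simpa using this
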